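-- pv_equiv track=rewrite | github.com/yethikrishna/yeti-ai | backend/main.py | plan_tasks
-- ===== SOURCE A (Python) =====
-- from typing import Optional, List, Dict, Any
--
-- def plan_tasks(prompt: str) -> List[str]:
--     prompt_lower = prompt.lower()
--
--     if any(keyword in prompt_lower for keyword in ["summarize", "summary", "tl;dr"]):
--         return ["analyze", "summarize"]
--     elif any(keyword in prompt_lower for keyword in ["code", "programming", "function", "debug"]):
--         return ["parse", "generate_code"]
--     elif any(keyword in prompt_lower for keyword in ["translate", "translation"]):
--         return ["detect_language", "translate"]
--     elif any(keyword in prompt_lower for keyword in ["search", "look up", "find", "what is", "who is"]):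
--         return ["web_browse", "analyze", "summarize"]
--     elif any(keyword in prompt_lower for keyword in ["create", "write", "poem", "story"]):
--         return ["creative_generation"]
--     else:
--         return ["general_response"]
-- ===== SOURCE B (Python) =====
-- KEYWORD_PRIORITY = {
--     "summarize": 0, "summary": 0, "tl;dr": 0,
--     "code": 1, "programming": 1, "function": 1, "debug": 1,
--     "translate": 2, "translation": 2,
--     "search": 3, "look up": 3, "find": 3, "what is": 3, "who is": 3,
--     "create": 4, "write": 4, "poem": 4, "story": 4,
-- }
--
-- TASKS = [
--     ["analyze", "summarize"],
--     ["parse", "generate_code"],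
--     ["detect_language", "translate"],
--     ["web_browse", "analyze", "summarize"],
--     ["creative_generation"],
--     ["general_response"],
-- ]
--
-- def plan_tasks(prompt: str):
--     p = prompt.lower()
--     best = min((prio for kw, prio in KEYWORD_PRIORITY.items() if kw in p),
--                default=len(TASKS) - 1)
--     return list(TASKS[best])
-- ===== Notes on version B (the rewrite author's own statement) =====
-- stated objective: alternative
-- what changed: Replaces the if/elif branch chain (first matching keyword group wins) by a flat keyword-to-priority map: B tests every keyword, takes the minimum priority among the hits (default = last slot), and indexes a tasks table with it.
import Mathlib
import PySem

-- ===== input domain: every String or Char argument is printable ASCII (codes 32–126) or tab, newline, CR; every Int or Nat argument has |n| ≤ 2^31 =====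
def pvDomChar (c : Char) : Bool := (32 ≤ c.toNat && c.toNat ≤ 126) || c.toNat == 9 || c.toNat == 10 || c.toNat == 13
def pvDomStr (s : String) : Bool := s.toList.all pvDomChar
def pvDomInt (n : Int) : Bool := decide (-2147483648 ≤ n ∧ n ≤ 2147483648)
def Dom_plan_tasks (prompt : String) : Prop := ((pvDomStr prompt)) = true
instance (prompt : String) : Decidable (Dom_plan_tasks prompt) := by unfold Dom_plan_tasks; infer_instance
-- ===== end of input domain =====

-- B replaces A's first-match if/elif chain by a flat keyword→priority map: it tests every
-- keyword, takes the minimum priority among the hits (default = last slot) and indexes a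
-- tasks table (objective: alternative); return values identical.

-- ===== PORT A =====
def plan_tasks (prompt : String) : List String :=
  let prompt_lower := PySem.Str.lower prompt
  if (["summarize", "summary", "tl;dr"].any fun keyword => PySem.Str.isIn keyword prompt_lower) then
    ["analyze", "summarize"]
  else if (["code", "programming", "function", "debug"].any fun keyword => PySem.Str.isIn keyword prompt_lower) then
    ["parse", "generate_code"]
  else if (["translate", "translation"].any fun keyword => PySem.Str.isIn keyword prompt_lower) then
    ["detect_language", "translate"]
  else if (["search", "look up", "find", "what is", "who is"].any fun keyword => PySem.Str.isIn keyword prompt_lower) then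
    ["web_browse", "analyze", "summarize"]
  else if (["create", "write", "poem", "story"].any fun keyword => PySem.Str.isIn keyword prompt_lower) then
    ["creative_generation"]
  else
    ["general_response"]

-- ===== PORT B =====
def pvKeywordPriority : List (String × Nat) :=
  [ ("summarize", 0), ("summary", 0), ("tl;dr", 0)
  , ("code", 1), ("programming", 1), ("function", 1), ("debug", 1)
  , ("translate", 2), ("translation", 2)
  , ("search", 3), ("look up", 3), ("find", 3), ("what is", 3), ("who is", 3)
  , ("create", 4), ("write", 4), ("poem", 4), ("story", 4) ]

def pvTasks : List (List String) :=
  [ ["analyze", "summarize"]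
  , ["parse", "generate_code"]
  , ["detect_language", "translate"]
  , ["web_browse", "analyze", "summarize"]
  , ["creative_generation"]
  , ["general_response"] ]

def plan_tasks_alt (prompt : String) : List String :=
  let p := PySem.Str.lower prompt
  let hits := (pvKeywordPriority.filter (fun kv => PySem.Str.isIn kv.1 p)).map Prod.snd
  let best := match PySem.List.min? hits (fun x => x) with
              | some m => m
              | none => pvTasks.length - 1
  pvTasks.getD best []

-- ===== PRECONDITION & SPEC =====
def Spec_plan_tasks (prompt : String) (out : List String) : Prop := out = plan_tasks_alt prompt
instance (prompt : String) (out : List String) : Decidable (Spec_plan_tasks prompt out) := by unfold Spec_plan_tasks; infer_instance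

-- ===== CLAIM (what is proved, stated in full; the proofs are below) =====
def Claim_equal_plan_tasks : Prop := ∀ (prompt : String), Dom_plan_tasks prompt → Spec_plan_tasks prompt (plan_tasks prompt)

-- ===== LEMMAS AND PROOFS =====

-- folding min into an element below the whole list returns it
theorem pv_foldl_min_eq (t : List Nat) : ∀ (x : Nat), (∀ y ∈ t, x ≤ y) → t.foldl min x = x := by
  induction t with
  | nil => intro x _; rfl
  | cons a t ih =>
    intro x hx
    have hxa : x ≤ a := hx a (by simp)
    simp only [List.foldl, Nat.min_eq_left hxa]
    exact ih x (fun y hy => hx y (by simp [hy]))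

-- Python's min over a nondecreasing list is its first element
theorem pv_min?_sorted (l : List Nat) (h : l.Pairwise (· ≤ ·)) :
    PySem.List.min? l (fun x => x) = l.head? := by
  cases l with
  | nil => simp [PySem.List.min?]
  | cons x t =>
    rw [PySem.List.min?_id_cons]
    simp only [List.head?]
    exact congrArg some (pv_foldl_min_eq t x (fun y hy => (List.pairwise_cons.mp h).1 y hy))

-- both sides as a function of the per-keyword membership test, after min → first hit
theorem pv_key (b : String → Bool) :
    (if (["summarize", "summary", "tl;dr"].any b) then
      ["analyze", "summarize"]
    else if (["code", "programming", "function", "debug"].any b) then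
      ["parse", "generate_code"]
    else if (["translate", "translation"].any b) then
      ["detect_language", "translate"]
    else if (["search", "look up", "find", "what is", "who is"].any b) then
      ["web_browse", "analyze", "summarize"]
    else if (["create", "write", "poem", "story"].any b) then
      ["creative_generation"]
    else
      ["general_response"])
    =
    pvTasks.getD
      (match (pvKeywordPriority.find? (fun kv => b kv.1)).map Prod.snd with
       | some m => m
       | none => pvTasks.length - 1) [] := by
  unfold pvKeywordPriority pvTasks
  cases h1 : b "summarize" <;> simp_all [List.find?, List.any]
  cases h2 : b "summary" <;> simp_all [List.find?, List.any]
  cases h3 : b "tl;dr" <;> simp_all [List.find?, List.any]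
  cases h4 : b "code" <;> simp_all [List.find?, List.any]
  cases h5 : b "programming" <;> simp_all [List.find?, List.any]
  cases h6 : b "function" <;> simp_all [List.find?, List.any]
  cases h7 : b "debug" <;> simp_all [List.find?, List.any]
  cases h8 : b "translate" <;> simp_all [List.find?, List.any]
  cases h9 : b "translation" <;> simp_all [List.find?, List.any]
  cases h10 : b "search" <;> simp_all [List.find?, List.any]
  cases h11 : b "look up" <;> simp_all [List.find?, List.any]
  cases h12 : b "find" <;> simp_all [List.find?, List.any]
  cases h13 : b "what is" <;> simp_all [List.find?, List.any]
  cases h14 : b "who is" <;> simp_all [List.find?, List.any]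
  cases h15 : b "create" <;> simp_all [List.find?, List.any]
  cases h16 : b "write" <;> simp_all [List.find?, List.any]
  cases h17 : b "poem" <;> simp_all [List.find?, List.any]
  cases h18 : b "story" <;> simp_all [List.find?, List.any]

-- ===== VERDICT (by name: the statement is the Claim_ definition above) =====
theorem plan_tasks_spec : Claim_equal_plan_tasks := by
  intro prompt _
  have hsorted :
      (((pvKeywordPriority.filter (fun kv => PySem.Str.isIn kv.1 (PySem.Str.lower prompt))).map Prod.snd)).Pairwise (· ≤ ·) := by
    have hsub :
        List.Sublist
          ((pvKeywordPriority.filter (fun kv => PySem.Str.isIn kv.1 (PySem.Str.lower prompt))).map Prod.snd)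
          (pvKeywordPriority.map Prod.snd) :=
      List.Sublist.map Prod.snd List.filter_sublist
    exact (by decide : (pvKeywordPriority.map Prod.snd).Pairwise (· ≤ ·)).sublist hsub
  unfold Spec_plan_tasks
  simp only [plan_tasks, plan_tasks_alt]
  rw [pv_min?_sorted _ hsorted, List.head?_map, List.head?_filter]
  exact pv_key (fun k => PySem.Str.isIn k (PySem.Str.lower prompt))
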